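-- pv_equiv track=rewrite | github.com/VriskaSerket51/CTF_WriteUps | 2023/TUCTF/custom-ecb-cipher/solve.py | inverse2
-- ===== SOURCE A (Python) =====
-- def to_bin(num):
--     return list(map(int, list(bin(num)[2:].zfill(32))))
--
-- def xor_list(lhs, rhs):
--     return [x ^ y for (x, y) in zip(lhs, rhs)]
--
-- def and_list(lhs, rhs):
--     return [x & y for (x, y) in zip(lhs, rhs)]
--
-- def inverse2(msg, num1, num2, helper=None):
--     if isinstance(num2, int):
--         num2 = to_bin(num2)
--     a1 = helper
--     if helper == None:
--         a1 = [0] * num1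
--     a2 = num2[len(num2)-num1:]
--     lhs = and_list(a1, a2)
--     rhs = msg[len(msg)-num1:]
--     last = xor_list(lhs, rhs)
--     leftover = len(msg) - num1
--     if leftover == num1:
--         return xor_list(and_list(num2[:num1], last), msg[:num1]) + last
--     elif leftover > num1:
--         last = inverse2(msg[:len(msg)-num1], num1,
--                         num2[:len(msg)-num1], last) + last
--     else:
--         last = xor_list(and_list(last[len(last)-leftover:],
--                                  num2[:leftover]), msg[:leftover]) + last
--     return last
-- ===== SOURCE B (Python) =====
-- def _xor(a, b):
--     return [x ^ y for x, y in zip(a, b)]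
--
--
-- def _and(a, b):
--     return [x & y for x, y in zip(a, b)]
--
--
-- def inverse2(msg, num1, num2, helper=None):
--     if isinstance(num2, int):
--         num2 = [int(c) for c in bin(num2)[2:].zfill(32)]
--     bits = num2
--     h = helper if helper is not None else [0] * num1
--     m = len(msg)
--     rev_blocks = []
--     while m - num1 > num1:
--         block = _xor(_and(h, bits[len(bits) - num1:]), msg[m - num1:m])
--         rev_blocks.append(block)
--         bits = bits[:m - num1]
--         h = block
--         m -= num1
--     block = _xor(_and(h, bits[len(bits) - num1:]), msg[m - num1:m])
--     leftover = m - num1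
--     if leftover == num1:
--         head = _xor(_and(bits[:num1], block), msg[:num1])
--     else:
--         head = _xor(_and(block[len(block) - leftover:], bits[:leftover]), msg[:leftover])
--     out = head + block
--     for b in reversed(rev_blocks):
--         out += b
--     return out
-- ===== Notes on version B (the rewrite author's own statement) =====
-- stated objective: alternative
-- what changed: Replaces A's recursion, which re-slices the whole remaining message prefix at every level and rebuilds the result by repeated concatenation, by a single last-to-first loop over block windows of the original list that collects the blocks and concatenates them once.
import Mathlib
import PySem

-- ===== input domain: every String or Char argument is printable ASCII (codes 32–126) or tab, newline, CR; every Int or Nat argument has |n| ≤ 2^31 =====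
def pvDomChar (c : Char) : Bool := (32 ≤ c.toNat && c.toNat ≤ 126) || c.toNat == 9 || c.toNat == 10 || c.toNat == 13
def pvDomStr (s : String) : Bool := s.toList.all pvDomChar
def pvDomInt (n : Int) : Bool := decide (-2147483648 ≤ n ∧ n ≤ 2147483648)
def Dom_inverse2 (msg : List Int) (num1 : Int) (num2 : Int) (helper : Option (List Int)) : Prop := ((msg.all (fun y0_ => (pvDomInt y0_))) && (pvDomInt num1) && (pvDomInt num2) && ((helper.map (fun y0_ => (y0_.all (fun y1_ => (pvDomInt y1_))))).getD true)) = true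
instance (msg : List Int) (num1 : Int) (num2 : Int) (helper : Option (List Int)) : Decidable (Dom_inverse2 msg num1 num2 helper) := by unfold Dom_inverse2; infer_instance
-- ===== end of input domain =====

-- B replaces A's recursion by one last-to-first loop over block windows of the original list,
-- collecting the blocks and concatenating them once (objective: alternative decomposition).

-- shared module helpers (Python's to_bin / xor_list / and_list, used by both sources)
-- to_bin: bin(num)[2:].zfill(32) then int() on each char; PySem.Int.ofChars? is exact where Python's int(c) returns
def pvToBin (num : Int) : List Int :=
  (PySem.Chars.zfill (PySem.List.slice (PySem.Int.toBinChars0b num) (some 2) none) 32).map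
    (fun c => (PySem.Int.ofChars? [c]).getD 0)

def pvXorList (lhs rhs : List Int) : List Int := (lhs.zip rhs).map (fun p => PySem.Int.bxor p.1 p.2)

def pvAndList (lhs rhs : List Int) : List Int := (lhs.zip rhs).map (fun p => PySem.Int.band p.1 p.2)

-- ===== PORT A =====
-- A's recursive body after the isinstance conversion (recursive calls pass num2 as a list and helper = some last);
-- fuel only makes the non-terminating inputs (num1 ≤ 0 with msg ≠ []) total — never reached under Pre_
def inverse2Rec : Nat → List Int → Int → List Int → Option (List Int) → List Int
  | 0, _, _, _, _ => []
  | fuel + 1, msg, num1, num2, helper =>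
    let a1 := match helper with
      | none => List.replicate num1.toNat 0
      | some h => h
    let a2 := PySem.List.slice num2 (some ((num2.length : Int) - num1)) none
    let lhs := pvAndList a1 a2
    let rhs := PySem.List.slice msg (some ((msg.length : Int) - num1)) none
    let last := pvXorList lhs rhs
    let leftover : Int := (msg.length : Int) - num1
    if leftover = num1 then
      pvXorList (pvAndList (PySem.List.slice num2 none (some num1)) last)
        (PySem.List.slice msg none (some num1)) ++ last
    else if num1 < leftover then
      inverse2Rec fuel (PySem.List.slice msg none (some ((msg.length : Int) - num1))) num1
        (PySem.List.slice num2 none (some ((msg.length : Int) - num1))) (some last) ++ last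
    else
      pvXorList (pvAndList (PySem.List.slice last (some ((last.length : Int) - leftover)) none)
          (PySem.List.slice num2 none (some leftover)))
        (PySem.List.slice msg none (some leftover)) ++ last

def inverse2 (msg : List Int) (num1 : Int) (num2 : Int) (helper : Option (List Int)) : List Int :=
  inverse2Rec (msg.length + 1) msg num1 (pvToBin num2) helper

-- ===== PORT B =====
-- Source B's while-loop: m is the length of the still-unprocessed prefix, blocks are appended to rev_blocks;
-- fuel only makes the non-terminating inputs (num1 ≤ 0 with msg ≠ []) total — never reached under Pre_
def inverse2AltLoop : Nat → List Int → Int → Int → List Int → List Int → List (List Int) → List Int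
  | 0, _, _, _, _, _, _ => []
  | fuel + 1, msg, num1, m, bits, h, revBlocks =>
    if num1 < m - num1 then
      let block := pvXorList (pvAndList h (PySem.List.slice bits (some ((bits.length : Int) - num1)) none))
        (PySem.List.slice msg (some (m - num1)) (some m))
      inverse2AltLoop fuel msg num1 (m - num1) (PySem.List.slice bits none (some (m - num1))) block
        (revBlocks ++ [block])
    else
      let block := pvXorList (pvAndList h (PySem.List.slice bits (some ((bits.length : Int) - num1)) none))
        (PySem.List.slice msg (some (m - num1)) (some m))
      let leftover := m - num1
      let head :=
        if leftover = num1 then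
          pvXorList (pvAndList (PySem.List.slice bits none (some num1)) block)
            (PySem.List.slice msg none (some num1))
        else
          pvXorList (pvAndList (PySem.List.slice block (some ((block.length : Int) - leftover)) none)
              (PySem.List.slice bits none (some leftover)))
            (PySem.List.slice msg none (some leftover))
      revBlocks.reverse.foldl (· ++ ·) (head ++ block)

def inverse2_alt (msg : List Int) (num1 : Int) (num2 : Int) (helper : Option (List Int)) : List Int :=
  let bits := pvToBin num2
  let h := match helper with
    | none => List.replicate num1.toNat 0
    | some hh => hh
  inverse2AltLoop (msg.length + 1) msg num1 (msg.length : Int) bits h []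

-- ===== PRECONDITION & SPEC =====
-- Pre_ excludes num2 < 0, where A's to_bin raises ValueError (int() applied to '-'/'b'), and
-- num1 ≤ 0 with msg ≠ [] (or num1 < 0), where A recurses on an unshrinking prefix until RecursionError.
def Pre_inverse2 (msg : List Int) (num1 : Int) (num2 : Int) (helper : Option (List Int)) : Prop :=
  0 ≤ num2 ∧ (1 ≤ num1 ∨ (num1 = 0 ∧ msg = []))
instance (msg : List Int) (num1 : Int) (num2 : Int) (helper : Option (List Int)) : Decidable (Pre_inverse2 msg num1 num2 helper) := by unfold Pre_inverse2; infer_instance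

def pvWitness_inverse2 : List Int × Int × Int × Option (List Int) := ([1, 0, 1, 1, 0], 2, 5, none)

def Spec_inverse2 (msg : List Int) (num1 : Int) (num2 : Int) (helper : Option (List Int)) (out : List Int) : Prop := out = inverse2_alt msg num1 num2 helper
instance (msg : List Int) (num1 : Int) (num2 : Int) (helper : Option (List Int)) (out : List Int) : Decidable (Spec_inverse2 msg num1 num2 helper out) := by unfold Spec_inverse2; infer_instance

-- ===== CLAIM (what is proved, stated in full; the proofs are below) =====
def Claim_equal_inverse2 : Prop := ∀ (msg : List Int) (num1 : Int) (num2 : Int) (helper : Option (List Int)), Dom_inverse2 msg num1 num2 helper → Pre_inverse2 msg num1 num2 helper → Spec_inverse2 msg num1 num2 helper (inverse2 msg num1 num2 helper)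

-- ===== LEMMAS AND PROOFS =====

-- folding ++ over the collected blocks is appending their concatenation
theorem pv_foldl_app (bs : List (List Int)) (acc : List Int) :
    bs.foldl (· ++ ·) acc = acc ++ bs.flatten := by
  simpa using PySem.List.foldl_append_eq_flatMap id bs acc

-- xs[a:len(xs)] = xs[a:] for every Int a
theorem pv_slice_stop_len (xs : List Int) (a : Int) :
    PySem.List.slice xs (some a) (some ((xs.length : Int))) = PySem.List.slice xs (some a) none := by
  simp [PySem.List.slice, PySem.List.clampIdx]
  split_ifs <;> omega

-- xs[a:m] = xs[:m][a:] for 0 ≤ a and m ≤ len(xs)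
theorem pv_slice_window (xs : List Int) (a : Int) (m : Nat) (ha : 0 ≤ a) :
    PySem.List.slice xs (some a) (some (m : Int)) = PySem.List.slice (xs.take m) (some a) none := by
  rw [PySem.List.slice_toNat xs ha (Int.natCast_nonneg m), PySem.List.slice_from _ ha]
  simp [List.drop_take]

-- xs[:b] = xs[:m][:b] for 0 ≤ b ≤ m
theorem pv_slice_to_prefix (xs : List Int) (b : Int) (m : Nat) (hb : 0 ≤ b) (hbm : b ≤ (m : Int)) :
    PySem.List.slice (xs.take m) none (some b) = PySem.List.slice xs none (some b) := by
  rw [PySem.List.slice_to _ hb, PySem.List.slice_to _ hb, List.take_take]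
  congr 1
  omega

-- the loop of B equals A's recursion on the prefix of length m, with the collected blocks appended
theorem pv_altLoop_eq (num1 : Int) (h1 : 1 ≤ num1) :
    ∀ (fuel : Nat) (msg : List Int) (m : Nat) (bits hh : List Int) (bs : List (List Int)),
      m ≤ msg.length → (m = msg.length ∨ num1 < (m : Int)) → m + 1 ≤ fuel →
      inverse2AltLoop fuel msg num1 (m : Int) bits hh bs
        = inverse2Rec fuel (msg.take m) num1 bits (some hh) ++ bs.reverse.flatten := by
  intro fuel
  induction fuel with
  | zero => intro msg m bits hh bs hm hinv hf; omega
  | succ fuel ih =>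
    intro msg m bits hh bs hm hinv hf
    have hlen : (msg.take m).length = m := by simp; omega
    have hwin : PySem.List.slice msg (some ((m : Int) - num1)) (some (m : Int))
        = PySem.List.slice (msg.take m) (some ((m : Int) - num1)) none := by
      by_cases hpos : 0 ≤ (m : Int) - num1
      · exact pv_slice_window msg _ m hpos
      · have hme : m = msg.length := by
          rcases hinv with h | h
          · exact h
          · omega
        rw [hme, List.take_length]
        exact pv_slice_stop_len msg _
    simp only [inverse2AltLoop, inverse2Rec, hlen]
    by_cases hc : num1 < (m : Int) - num1
    · rw [if_pos hc, if_neg (by omega : ¬ ((m : Int) - num1 = num1)), if_pos hc, hwin]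
      set m' := m - num1.toNat with hm'
      have hcast : (m : Int) - num1 = (m' : Int) := by omega
      rw [hcast]
      have hargA : PySem.List.slice (msg.take m) none (some ((m' : Nat) : Int)) = msg.take m' := by
        rw [PySem.List.slice_to _ (Int.natCast_nonneg _)]
        simp [List.take_take, Nat.min_eq_left (by omega : m' ≤ m)]
      rw [hargA]
      rw [ih msg m' _ _ _ (by omega) (Or.inr (by omega)) (by omega)]
      simp [List.append_assoc]
    · rw [if_neg hc, pv_foldl_app, hwin]
      by_cases he : (m : Int) - num1 = num1
      · rw [if_pos he, if_pos he,
          pv_slice_to_prefix msg num1 m (by omega) (by omega)]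
      · rw [if_neg he, if_neg he, if_neg hc]
        have hslice : PySem.List.slice msg none (some ((m : Int) - num1))
            = PySem.List.slice (msg.take m) none (some ((m : Int) - num1)) := by
          by_cases hpos : 0 ≤ (m : Int) - num1
          · exact (pv_slice_to_prefix msg _ m hpos (by omega)).symm
          · have hme : m = msg.length := by
              rcases hinv with h | h
              · exact h
              · omega
            rw [hme, List.take_length]
        rw [hslice]

-- resolving the None default before the call does not change A's recursion
theorem pv_rec_getD (fuel : Nat) (msg : List Int) (num1 : Int) (bits : List Int)
    (helper : Option (List Int)) :
    inverse2Rec fuel msg num1 bits helper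
      = inverse2Rec fuel msg num1 bits
          (some (match helper with
            | none => List.replicate num1.toNat 0
            | some h => h)) := by
  cases helper <;> cases fuel <;> rfl

-- ===== VERDICT (by name: the statement is the Claim_ definition above) =====
theorem inverse2_spec : Claim_equal_inverse2 := by
  unfold Claim_equal_inverse2
  intro msg num1 num2 helper _ hpre
  unfold Spec_inverse2
  obtain ⟨_, hcase⟩ := hpre
  rcases hcase with h1 | ⟨h0, hnil⟩
  · unfold inverse2 inverse2_alt
    rw [pv_rec_getD]
    exact ((pv_altLoop_eq num1 h1 (msg.length + 1) msg msg.length (pvToBin num2) _ []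
      (le_refl _) (Or.inl rfl) (le_refl _)).trans (by simp)).symm
  · subst hnil h0
    simp [inverse2, inverse2_alt, inverse2Rec, inverse2AltLoop, pvXorList, pvAndList,
      PySem.List.slice, PySem.List.clampIdx]
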